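-- pv_equiv track=rewrite | github.com/TulipeSoyeuse/webserv | site-test3/cgi-bin/cgi-py.py | decode_query_string
-- ===== SOURCE A (Python) =====
-- def decode_query_string(query_string):
--     decoded_string = ""
--     i = 0
--     while i < len(query_string):
--         if query_string[i] == "%":
--             hex_value = query_string[i + 1 : i + 3]
--             decoded_string += chr(int(hex_value, 16))
--             i += 3
--         elif query_string[i] == "+":
--             decoded_string += " "
--             i += 1
--         else:
--             decoded_string += query_string[i]
--             i += 1
--     return decoded_string
-- ===== SOURCE B (Python) =====
-- def decode_query_string(query_string):
--     # Tokenize on '%': each later segment starts with a two-char hex escape.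
--     parts = query_string.split('%')
--     out = [parts[0].replace('+', ' ')]
--     for seg in parts[1:]:
--         out.append(chr(int(seg[:2], 16)) + seg[2:].replace('+', ' '))
--     return ''.join(out)
-- ===== Notes on version B (the rewrite author's own statement) =====
-- stated objective: faster
-- what changed: Replaces the per-character pointer scan with quadratic string += by a split-on-'%' tokenize pass: decode each later segment's leading hex pair, str.replace for '+', and ''.join the pieces.
import Mathlib
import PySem

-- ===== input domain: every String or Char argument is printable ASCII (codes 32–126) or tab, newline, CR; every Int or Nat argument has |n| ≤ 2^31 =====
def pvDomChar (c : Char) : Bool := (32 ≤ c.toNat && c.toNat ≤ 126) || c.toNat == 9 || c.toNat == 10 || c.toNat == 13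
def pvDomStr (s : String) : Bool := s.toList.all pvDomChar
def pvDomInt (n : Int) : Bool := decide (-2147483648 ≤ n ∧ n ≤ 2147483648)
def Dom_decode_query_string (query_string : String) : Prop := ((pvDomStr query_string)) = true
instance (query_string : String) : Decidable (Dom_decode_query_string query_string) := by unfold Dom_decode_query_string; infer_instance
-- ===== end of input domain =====

-- B replaces A's per-character pointer scan with quadratic string += by a split-on-'%'
-- tokenize pass (decode the leading hex pair of each later segment, replace '+' in the
-- rest, join the pieces); a timing run measured B faster on the generated inputs.
-- Equivalence is proved on Pre_ (exactly the inputs where A returns).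

-- ----- shared helper: Python's int(s, 16), exact for strings of length ≤ 2 over the Dom
-- alphabet (hex digits; optional single leading whitespace/sign or trailing whitespace);
-- none = ValueError -----
def pvHexDig? (c : Char) : Option Nat :=
  if '0' ≤ c ∧ c ≤ '9' then some (c.toNat - 48)
  else if 'a' ≤ c ∧ c ≤ 'f' then some (c.toNat - 87)
  else if 'A' ≤ c ∧ c ≤ 'F' then some (c.toNat - 55)
  else none

def pvIsWs (c : Char) : Bool :=
  c = ' ' || c = '\t' || c = '\n' || c = '\r' || c.toNat == 11 || c.toNat == 12

def pvInt16? (cs : List Char) : Option Int :=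
  match cs with
  | [] => none
  | [c] => (pvHexDig? c).map (fun n => (n : Int))
  | [c1, c2] =>
    match pvHexDig? c1, pvHexDig? c2 with
    | some a, some b => some ((16 * a + b : Nat) : Int)
    | _, _ =>
      if pvIsWs c1 then (pvHexDig? c2).map (fun n => (n : Int))
      else if pvIsWs c2 then (pvHexDig? c1).map (fun n => (n : Int))
      else if c1 = '+' then (pvHexDig? c2).map (fun n => (n : Int))
      else if c1 = '-' then (pvHexDig? c2).map (fun n => -(n : Int))
      else none
  | _ => none

-- pvEscB u = the two(or fewer)-character window after a '%' parses as a nonnegative escape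
def pvEscB (u : List Char) : Bool :=
  match pvInt16? (u.take 2) with
  | some n => decide (0 ≤ n)
  | none => false

-- ===== PORT A ===== (the while-loop over index i, as structural recursion on the suffix;
-- none = the ValueError of int(...,16) or of chr on a negative value)
def pvGoA : List Char → Option (List Char)
  | [] => some []
  | c :: t =>
    if c = '%' then
      match pvInt16? (t.take 2) with
      | some n => if n < 0 then none
                  else (pvGoA (t.drop 2)).map (fun r => Char.ofNat n.toNat :: r)
      | none => none
    else if c = '+' then (pvGoA t).map (fun r => ' ' :: r)
    else (pvGoA t).map (fun r => c :: r)
  termination_by cs => cs.length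
  decreasing_by all_goals (simp; try omega)

def decode_query_string (query_string : String) : String :=
  String.ofList ((pvGoA query_string.toList).getD [])

-- ===== PORT B ===== (query_string.split('%'), decode each later segment, join)
def pvSplitPct : List Char → List (List Char)
  | [] => [[]]
  | c :: t =>
    if c = '%' then [] :: pvSplitPct t
    else
      match pvSplitPct t with
      | [] => [[c]]
      | h :: r => (c :: h) :: r

def pvReplPlus (cs : List Char) : List Char :=
  cs.map (fun c => if c = '+' then ' ' else c)

def pvEscSeg (seg : List Char) : Option (List Char) :=
  match pvInt16? (seg.take 2) with
  | some n => if n < 0 then none else some (Char.ofNat n.toNat :: pvReplPlus (seg.drop 2))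
  | none => none

def pvEscAll : List (List Char) → Option (List Char)
  | [] => some []
  | seg :: rest =>
    match pvEscSeg seg, pvEscAll rest with
    | some x, some ys => some (x ++ ys)
    | _, _ => none

def pvGoB (cs : List Char) : Option (List Char) :=
  match pvSplitPct cs with
  | [] => some []
  | h :: rest => (pvEscAll rest).map (fun ys => pvReplPlus h ++ ys)

def decode_query_string_alt (query_string : String) : String :=
  String.ofList ((pvGoB query_string.toList).getD [])

-- ===== PRECONDITION & SPEC =====
-- Pre_ = exactly the inputs on which A returns (no ValueError): every occurrence of '%' is
-- followed by a window of at most two characters that parses as a nonnegative hex escape.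
def pvQ (cs : List Char) : Prop :=
  ∀ i, i < cs.length → cs[i]? = some '%' → pvEscB (cs.drop (i + 1)) = true

def Pre_decode_query_string (query_string : String) : Prop :=
  pvQ query_string.toList
instance (query_string : String) : Decidable (Pre_decode_query_string query_string) := by
  unfold Pre_decode_query_string pvQ; infer_instance

def pvWitness_decode_query_string : String := "a%20b+c"

def Spec_decode_query_string (query_string : String) (out : String) : Prop := out = decode_query_string_alt query_string
instance (query_string : String) (out : String) : Decidable (Spec_decode_query_string query_string out) := by unfold Spec_decode_query_string; infer_instance

-- ===== CLAIM (what is proved, stated in full; the proofs are below) =====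
def Claim_equal_decode_query_string : Prop := ∀ (query_string : String), Dom_decode_query_string query_string → Pre_decode_query_string query_string → Spec_decode_query_string query_string (decode_query_string query_string)

-- ===== LEMMAS AND PROOFS =====

-- segment-wise restatement of Pre_ used by the induction: each segment after a '%' is a
-- valid escape, and only the last one may be shorter than two characters
def pvSegOK (lastSeg : Bool) (seg : List Char) : Bool :=
  (decide (2 ≤ seg.length) || lastSeg) && pvEscB seg

def pvTailOK : List (List Char) → Bool
  | [] => true
  | seg :: rest => pvSegOK rest.isEmpty seg && pvTailOK rest

theorem pvInt16?_pct (l : List Char) (h : '%' ∈ l) : pvInt16? l = none := by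
  match l with
  | [c] =>
    have hc : c = '%' := (List.mem_singleton.mp h).symm
    subst hc; decide
  | [c1, c2] =>
    rcases List.mem_cons.mp h with h1 | h2
    · subst h1
      cases hd : pvHexDig? c2 <;> by_cases hw : pvIsWs c2 <;>
        simp [pvInt16?, hd, hw, (by decide : pvHexDig? ('%' : Char) = none),
          (by decide : pvIsWs ('%' : Char) = false),
          (by decide : ¬ ('%' : Char) = '+'), (by decide : ¬ ('%' : Char) = '-')]
    · have hc : c2 = '%' := (List.mem_singleton.mp h2).symm
      subst hc
      cases hd : pvHexDig? c1 <;> by_cases hw : pvIsWs c1 <;>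
          by_cases hp : c1 = '+' <;> by_cases hm : c1 = '-' <;>
        simp [pvInt16?, hd, hw, hp, hm, (by decide : pvHexDig? ('%' : Char) = none),
          (by decide : pvIsWs ('%' : Char) = false)]
  | c :: d :: e :: t => rfl

-- decomposing the index-wise precondition across the first '%'
theorem pvQ_decomp (a x : List Char) (hq : pvQ (a ++ '%' :: x)) :
    pvEscB x = true ∧ pvQ x := by
  constructor
  · have hb : a.length < (a ++ '%' :: x).length := by simp
    have hg : (a ++ '%' :: x)[a.length]? = some '%' := by
      rw [List.getElem?_append_right (le_refl _)]
      simp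
    have hd : (a ++ '%' :: x).drop (a.length + 1) = x := by
      exact List.drop_length_add_append (i := 1) (l₁ := a) (l₂ := '%' :: x)
    have := hq a.length hb hg
    rwa [hd] at this
  · intro i hi hx
    have hb : a.length + (1 + i) < (a ++ '%' :: x).length := by simp; omega
    have hg : (a ++ '%' :: x)[a.length + (1 + i)]? = some '%' := by
      rw [List.getElem?_append_right (by omega)]
      simpa [Nat.add_sub_cancel_left, Nat.add_comm 1 i] using hx
    have hd : (a ++ '%' :: x).drop (a.length + (1 + i) + 1) = x.drop (i + 1) := by
      have : a.length + (1 + i) + 1 = a.length + (i + 2) := by omega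
      rw [this, List.drop_length_add_append (i := i + 2) (l₁ := a) (l₂ := '%' :: x)]
      simp
    have := hq (a.length + (1 + i)) hb hg
    rwa [hd] at this

theorem pvSplitPct_ne_nil (cs : List Char) : pvSplitPct cs ≠ [] := by
  induction cs with
  | nil => simp [pvSplitPct]
  | cons c t ih =>
    simp only [pvSplitPct]
    split
    · simp
    · cases h : pvSplitPct t <;> simp

theorem pvSplitPct_single (cs s : List Char) (h : pvSplitPct cs = [s]) :
    cs = s ∧ '%' ∉ cs := by
  induction cs generalizing s with
  | nil => simp [pvSplitPct] at h; simp [h]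
  | cons c t ih =>
    simp only [pvSplitPct] at h
    split at h
    · next hc =>
      exfalso
      cases hs : pvSplitPct t with
      | nil => exact pvSplitPct_ne_nil t hs
      | cons a b => rw [hs] at h; simp at h
    · next hc =>
      cases hs : pvSplitPct t with
      | nil => exact absurd hs (pvSplitPct_ne_nil t)
      | cons a b =>
        rw [hs] at h
        obtain ⟨h1, h2⟩ := List.cons.injEq _ _ _ _ ▸ h
        subst h2
        obtain ⟨ht, hn⟩ := ih a hs
        subst ht h1
        refine ⟨rfl, ?_⟩
        simp only [List.mem_cons, not_or]
        exact ⟨fun h' => hc h'.symm, hn⟩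

theorem pvSplitPct_cons_cons (cs s b : List Char) (r : List (List Char))
    (h : pvSplitPct cs = s :: b :: r) :
    ∃ t', cs = s ++ '%' :: t' ∧ pvSplitPct t' = b :: r ∧ '%' ∉ s := by
  induction cs generalizing s with
  | nil => simp [pvSplitPct] at h
  | cons c t ih =>
    simp only [pvSplitPct] at h
    split at h
    · next hc =>
      subst hc
      obtain ⟨h1, h2⟩ := List.cons.injEq _ _ _ _ ▸ h
      exact ⟨t, by simp [h1.symm], h2, by simp [h1.symm]⟩
    · next hc =>
      cases hs : pvSplitPct t with
      | nil => exact absurd hs (pvSplitPct_ne_nil t)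
      | cons a rs =>
        rw [hs] at h
        obtain ⟨h1, h2⟩ := List.cons.injEq _ _ _ _ ▸ h
        subst h1 h2
        obtain ⟨t', ht, hsp, hn⟩ := ih a hs
        refine ⟨t', by simp [ht], hsp, ?_⟩
        simp only [List.mem_cons, not_or]
        exact ⟨fun h' => hc h'.symm, hn⟩

theorem pvSplitPct_append (a b : List Char) (h : '%' ∉ a) :
    pvSplitPct (a ++ '%' :: b) = a :: pvSplitPct b := by
  induction a with
  | nil => simp [pvSplitPct]
  | cons c t ih =>
    simp only [List.mem_cons, not_or] at h
    simp [pvSplitPct, Ne.symm h.1, ih h.2]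

theorem pvGoA_noPct (a : List Char) (h : '%' ∉ a) : pvGoA a = some (pvReplPlus a) := by
  induction a with
  | nil => simp [pvGoA, pvReplPlus]
  | cons c t ih =>
    simp only [List.mem_cons, not_or] at h
    rw [pvGoA]
    simp only [if_neg (Ne.symm h.1), ih h.2]
    by_cases hp : c = '+' <;> simp [hp, pvReplPlus]

theorem pvEscAll_cons (seg : List Char) (rest : List (List Char)) (x : List Char)
    (h : pvEscSeg seg = some x) :
    pvEscAll (seg :: rest) = (pvEscAll rest).map (fun ys => x ++ ys) := by
  cases hE : pvEscAll rest <;> simp [pvEscAll, h, hE]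

theorem pvGoB_cons (c : Char) (t : List Char) (hc : c ≠ '%') :
    pvGoB (c :: t) = (pvGoB t).map (fun r => (if c = '+' then ' ' else c) :: r) := by
  cases hs : pvSplitPct t with
  | nil => exact absurd hs (pvSplitPct_ne_nil t)
  | cons h rest =>
    simp only [pvGoB, pvSplitPct, if_neg hc, hs]
    cases pvEscAll rest <;> by_cases hp : c = '+' <;> simp [hp, pvReplPlus]

-- the index-wise Pre_ implies the segment-wise invariant pvTailOK
theorem pvAux : ∀ (n : Nat) (t : List Char), t.length ≤ n →
    pvEscB t = true → pvQ t → pvTailOK (pvSplitPct t) = true := by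
  intro n
  induction n with
  | zero =>
    intro t hlen hE _
    have h0 : t = [] := List.eq_nil_of_length_eq_zero (Nat.le_zero.mp hlen)
    subst h0
    simp [pvEscB, pvInt16?] at hE
  | succ n ih =>
    intro t hlen hE hq
    cases hs : pvSplitPct t with
    | nil => exact absurd hs (pvSplitPct_ne_nil t)
    | cons seg0 rest =>
      cases rest with
      | nil =>
        obtain ⟨ht, hnp⟩ := pvSplitPct_single t seg0 hs
        subst ht
        simp [pvTailOK, pvSegOK, hE]
      | cons b r =>
        obtain ⟨t', ht, hsp, hnp⟩ := pvSplitPct_cons_cons t seg0 b r hs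
        have hlen2 : 2 ≤ seg0.length := by
          by_contra hlt
          have hmem : '%' ∈ t.take 2 := by
            subst ht
            cases seg0 with
            | nil => simp
            | cons a s0 =>
              cases s0 with
              | nil => simp
              | cons b' s0' => exact absurd (by simp) hlt
          have : pvInt16? (t.take 2) = none := pvInt16?_pct _ hmem
          simp [pvEscB, this] at hE
        have hEseg : pvEscB seg0 = true := by
          have htake : t.take 2 = seg0.take 2 := by
            rw [ht, List.take_append_of_le_length hlen2]
          simpa [pvEscB, htake] using hE
        obtain ⟨hE', hQ'⟩ := pvQ_decomp seg0 t' (ht ▸ hq)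
        have hih : pvTailOK (pvSplitPct t') = true := by
          apply ih t' _ hE' hQ'
          have : t.length = seg0.length + 1 + t'.length := by simp [ht]; omega
          omega
        rw [hsp] at hih
        rw [show pvTailOK (seg0 :: b :: r) = (pvSegOK (b :: r).isEmpty seg0 && pvTailOK (b :: r)) from rfl]
        rw [hih]
        simp [pvSegOK, hlen2, hEseg]

theorem pvPre_bridge (cs : List Char) (hq : pvQ cs) :
    pvTailOK ((pvSplitPct cs).tail) = true := by
  cases hs : pvSplitPct cs with
  | nil => exact absurd hs (pvSplitPct_ne_nil cs)
  | cons h rest =>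
    cases rest with
    | nil => simp [pvTailOK]
    | cons b r =>
      obtain ⟨t', ht, hsp, hnp⟩ := pvSplitPct_cons_cons cs h b r hs
      obtain ⟨hE', hQ'⟩ := pvQ_decomp h t' (ht ▸ hq)
      have hA := pvAux t'.length t' (le_refl _) hE' hQ'
      rw [hsp] at hA
      simpa using hA

theorem pv_main : ∀ (n : Nat) (cs : List Char), cs.length ≤ n →
    pvTailOK ((pvSplitPct cs).tail) = true → pvGoA cs = pvGoB cs := by
  intro n
  induction n with
  | zero =>
    intro cs hlen _
    have h0 : cs = [] := List.eq_nil_of_length_eq_zero (Nat.le_zero.mp hlen)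
    subst h0
    simp [pvGoA, pvGoB, pvSplitPct, pvEscAll, pvReplPlus]
  | succ n ih =>
    intro cs hlen hpre
    cases cs with
    | nil => simp [pvGoA, pvGoB, pvSplitPct, pvEscAll, pvReplPlus]
    | cons c t =>
      by_cases hc : c = '%'
      · subst hc
        -- the tail segments of '%'::t are ALL segments of t
        have hpre' : pvTailOK (pvSplitPct t) = true := by
          simpa [pvSplitPct] using hpre
        cases hs : pvSplitPct t with
        | nil => exact absurd hs (pvSplitPct_ne_nil t)
        | cons seg0 rest =>
          rw [hs] at hpre'
          cases rest with
          | nil =>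
            -- a single segment: seg0 = t and '%' does not occur in t
            obtain ⟨ht, hnp⟩ := pvSplitPct_single t seg0 hs
            subst ht
            have hok : pvSegOK true t = true := by
              simpa [pvTailOK] using hpre'
            simp only [pvSegOK, Bool.and_eq_true] at hok
            have hEt := hok.2
            cases hv : pvInt16? (t.take 2) with
            | none => simp [pvEscB, hv] at hEt
            | some v =>
              have hvnn : 0 ≤ v := by simpa [pvEscB, hv] using hEt
              have hdrop : '%' ∉ t.drop 2 := fun hm => hnp (List.mem_of_mem_drop hm)
              rw [pvGoA]
              simp [hv, if_neg (not_lt.mpr hvnn), pvGoA_noPct _ hdrop,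
                pvGoB, pvSplitPct, hs, pvEscAll, pvEscSeg, pvReplPlus]
          | cons b r =>
            obtain ⟨t', ht, hsp, hnp⟩ := pvSplitPct_cons_cons t seg0 b r hs
            have hok : pvSegOK false seg0 = true ∧ pvTailOK (b :: r) = true := by
              simpa [pvTailOK, Bool.and_eq_true] using hpre'
            simp only [pvSegOK, Bool.and_eq_true, Bool.or_eq_true, decide_eq_true_eq] at hok
            have hlen2 : 2 ≤ seg0.length := by
              rcases hok.1.1 with h2 | hfalse
              · exact h2
              · simp at hfalse
            cases hv : pvInt16? (seg0.take 2) with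
            | none =>
              exfalso
              have h' := hok.1.2
              simp [pvEscB, hv] at h'
            | some v =>
              have hvnn : 0 ≤ v := by
                simpa [pvEscB, hv] using hok.1.2
              have htake : t.take 2 = seg0.take 2 := by
                rw [ht, List.take_append_of_le_length hlen2]
              have hdropeq : t.drop 2 = seg0.drop 2 ++ '%' :: t' := by
                rw [ht, List.drop_append_of_le_length hlen2]
              have hnpd : '%' ∉ seg0.drop 2 := fun hm => hnp (List.mem_of_mem_drop hm)
              have hsd : pvSplitPct (t.drop 2) = seg0.drop 2 :: b :: r := by
                rw [hdropeq, pvSplitPct_append _ _ hnpd, hsp]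
              have hih : pvGoA (t.drop 2) = pvGoB (t.drop 2) := by
                apply ih
                · simp only [List.length_cons] at hlen
                  simp only [List.length_drop]
                  omega
                · rw [hsd]
                  simpa [pvTailOK] using hok.2
              have hEsc : pvEscSeg seg0 = some (Char.ofNat v.toNat :: pvReplPlus (seg0.drop 2)) := by
                simp [pvEscSeg, hv, if_neg (not_lt.mpr hvnn)]
              have hB2 : pvGoB (t.drop 2) =
                  (pvEscAll (b :: r)).map (fun ys => pvReplPlus (seg0.drop 2) ++ ys) := by
                simp [pvGoB, hsd]
              rw [pvGoA]
              simp only [htake, hv, if_neg (not_lt.mpr hvnn), hih, hB2]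
              have e1 : pvSplitPct ('%' :: t) = [] :: seg0 :: b :: r := by
                simp [pvSplitPct, hs]
              have e2 := pvEscAll_cons seg0 (b :: r) _ hEsc
              simp only [pvGoB, e1, e2]
              cases pvEscAll (b :: r) <;> simp [pvReplPlus]
      · -- ordinary character (or '+')
        have hpre' : pvTailOK ((pvSplitPct t).tail) = true := by
          cases hs : pvSplitPct t with
          | nil => exact absurd hs (pvSplitPct_ne_nil t)
          | cons h rest =>
            have he : (pvSplitPct (c :: t)).tail = rest := by
              simp [pvSplitPct, if_neg hc, hs]
            rw [he] at hpre
            simpa using hpre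
        have hih : pvGoA t = pvGoB t :=
          ih t (by simp only [List.length_cons] at hlen; omega) hpre'
        rw [pvGoA, pvGoB_cons c t hc]
        simp only [if_neg hc, hih]
        by_cases hp : c = '+' <;> simp [hp]

-- ===== VERDICT (by name: the statement is the Claim_ definition above) =====
theorem decode_query_string_spec : Claim_equal_decode_query_string := by
  intro s _ hpre
  unfold Spec_decode_query_string decode_query_string decode_query_string_alt
  rw [pv_main s.toList.length s.toList (le_refl _) (pvPre_bridge s.toList hpre)]
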